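-- pv_equiv track=rewrite | github.com/Gamah/ircgregate | ircgregate.py | getusr
-- ===== SOURCE A (Python) =====
-- def getusr(line):
--     sender = ""
--     for char in line[0]:
--         if(char == "!"):
--             break
--         if(char != ":"):
--             sender += char
--     return (sender)
-- ===== SOURCE B (Python) =====
-- def getusr(line):
--     return line[0].split("!", 1)[0].replace(":", "")
-- ===== Notes on version B (the rewrite author's own statement) =====
-- stated objective: idiomatic
-- what changed: Replaces the character-by-character scan with break/skip conditions by two library passes: split off the prefix before the first '!' with split('!', 1), then delete all colons from that prefix with replace.
import Mathlib
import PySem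

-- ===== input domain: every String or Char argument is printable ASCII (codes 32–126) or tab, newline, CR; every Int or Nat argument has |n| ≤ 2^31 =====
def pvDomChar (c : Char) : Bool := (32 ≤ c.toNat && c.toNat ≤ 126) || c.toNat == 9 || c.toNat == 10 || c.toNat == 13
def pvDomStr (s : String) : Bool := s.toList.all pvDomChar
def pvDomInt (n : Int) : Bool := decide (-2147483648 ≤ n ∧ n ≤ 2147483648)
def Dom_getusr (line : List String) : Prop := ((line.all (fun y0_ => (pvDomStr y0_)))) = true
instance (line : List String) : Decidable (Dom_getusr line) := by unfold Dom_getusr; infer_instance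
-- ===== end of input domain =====

-- B is the idiomatic two-pass version: split('!', 1)[0] then replace(':', ''); A is the manual scan.

-- ===== PORT A =====
-- the for-loop with break: accumulate chars before the first '!', skipping ':'
def getusrGo (acc : List Char) : List Char → List Char
  | [] => acc
  | c :: cs =>
    if c = '!' then acc
    else if c ≠ ':' then getusrGo (acc ++ [c]) cs
    else getusrGo acc cs

def getusr (line : List String) : String :=
  match PySem.List.pyGet? line 0 with
  | none => ""   -- IndexError in Python; excluded by Pre_getusr
  | some s => String.ofList (getusrGo [] s.toList)

-- ===== PORT B =====
def getusr_alt (line : List String) : String :=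
  match PySem.List.pyGet? line 0 with
  | none => ""   -- IndexError in Python; excluded by Pre_getusr
  | some s =>
    let parts := (PySem.Str.splitMax? s "!" 1).getD []
    let first := (PySem.List.pyGet? parts 0).getD ""
    PySem.Str.replace first ":" ""

-- ===== PRECONDITION & SPEC =====
-- Pre_ excludes only the empty list, on which Python's line[0] raises IndexError in both A and B.
def Pre_getusr (line : List String) : Prop := line ≠ []
instance (line : List String) : Decidable (Pre_getusr line) := by unfold Pre_getusr; infer_instance
def pvWitness_getusr : List String := [":nick!user@host PRIVMSG"]

def Spec_getusr (line : List String) (out : String) : Prop := out = getusr_alt line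
instance (line : List String) (out : String) : Decidable (Spec_getusr line out) := by unfold Spec_getusr; infer_instance

-- ===== CLAIM (what is proved, stated in full; the proofs are below) =====
def Claim_equal_getusr : Prop := ∀ (line : List String), Dom_getusr line → Pre_getusr line → Spec_getusr line (getusr line)

-- ===== LEMMAS AND PROOFS =====

-- A-side loop characterisation
theorem getusrGo_eq (l acc : List Char) :
    getusrGo acc l = acc ++ (l.takeWhile (fun c => c ≠ '!')).filter (fun c => c ≠ ':') := by
  induction l generalizing acc with
  | nil => simp [getusrGo]
  | cons c cs ih =>
    by_cases h : c = '!'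
    · simp [getusrGo, h, List.takeWhile]
    · by_cases h2 : c = ':'
      · simp [getusrGo, h2, ih, List.takeWhile]
      · simp [getusrGo, h, h2, ih, List.takeWhile]

theorem splitOnMaxGo_zero (fuel : Nat) (l : List Char) (acc : List (List Char)) :
    PySem.Chars.splitOnMax.go ['!'] fuel 0 l [] acc = acc.reverse ++ [l] := by
  cases fuel with
  | zero => simp [PySem.Chars.splitOnMax.go]
  | succ n =>
    cases l with
    | nil => simp [PySem.Chars.splitOnMax.go]
    | cons c cs => simp [PySem.Chars.splitOnMax.go]

-- splitOnMax.go with maxsplit 1: the first piece is everything before the first '!'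
theorem splitOnMaxGo_one (fuel : Nat) (l cur : List Char) (acc : List (List Char))
    (h : l.length < fuel) :
    ∃ t, PySem.Chars.splitOnMax.go ['!'] fuel 1 l cur acc
        = acc.reverse ++ (cur.reverse ++ l.takeWhile (fun c => c ≠ '!')) :: t := by
  induction fuel generalizing l cur acc with
  | zero => omega
  | succ n ih =>
    cases l with
    | nil => exact ⟨[], by simp [PySem.Chars.splitOnMax.go]⟩
    | cons c cs =>
      by_cases hc : c = '!'
      · refine ⟨[cs], ?_⟩
        simp [PySem.Chars.splitOnMax.go, List.isPrefixOf, hc, splitOnMaxGo_zero,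
          List.takeWhile]
      · obtain ⟨t, ht⟩ := ih cs (c :: cur) acc (by simpa using Nat.lt_of_succ_lt_succ h)
        refine ⟨t, ?_⟩
        simp [PySem.Chars.splitOnMax.go, List.isPrefixOf, hc, Ne.symm hc, ht, List.takeWhile]

-- replace.go with old = ":" and new = "" filters out colons
theorem replaceGo_colon (fuel : Nat) (l acc : List Char) (h : l.length ≤ fuel) :
    PySem.Chars.replace.go [':'] [] fuel l acc
      = acc.reverse ++ l.filter (fun c => c ≠ ':') := by
  induction fuel generalizing l acc with
  | zero =>
    have : l = [] := List.eq_nil_of_length_eq_zero (Nat.le_zero.mp h)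
    simp [this, PySem.Chars.replace.go]
  | succ n ih =>
    cases l with
    | nil => simp [PySem.Chars.replace.go]
    | cons c cs =>
      by_cases hc : c = ':'
      · simp [PySem.Chars.replace.go, List.isPrefixOf, hc,
          ih cs acc (by simpa using Nat.lt_succ_iff.mp h), List.filter]
      · simp [PySem.Chars.replace.go, List.isPrefixOf, hc, Ne.symm hc,
          ih cs (c :: acc) (by simpa using Nat.lt_succ_iff.mp h), List.filter]

theorem replace_colon (xs : List Char) :
    PySem.Chars.replace xs [':'] [] = xs.filter (fun c => c ≠ ':') := by
  simpa [PySem.Chars.replace] using replaceGo_colon xs.length xs [] le_rfl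

-- ===== VERDICT (by name: the statement is the Claim_ definition above) =====
theorem getusr_spec : Claim_equal_getusr := by
  intro line _ hpre
  unfold Spec_getusr getusr getusr_alt
  cases line with
  | nil => exact absurd rfl hpre
  | cons s rest =>
    obtain ⟨t, ht⟩ := splitOnMaxGo_one (s.toList.length + 1) s.toList [] []
      (Nat.lt_succ_self _)
    simp only [String.length_toList] at ht
    simp [PySem.Str.splitMax?, PySem.Chars.splitMax?, PySem.Chars.splitOnMax, ht,
      PySem.List.pyGet?, PySem.List.pyIdx?, PySem.Str.replace, replace_colon, getusrGo_eq]
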